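-- pv_equiv track=rewrite | github.com/ashwilliams7-code/SeekMateAI | slack_bot_responder.py | find_instance
-- ===== SOURCE A (Python) =====
-- def find_instance(instances, query):
--     query_lower = query.strip().lower()
--     for name in instances:
--         if name.lower() == query_lower:
--             return name
--     for name in instances:
--         if query_lower in name.lower():
--             return name
--     return None
-- ===== SOURCE B (Python) =====
-- def find_instance(instances, query):
--     query_lower = query.strip().lower()
--     fallback = None
--     for name in instances:
--         if name.lower() == query_lower:
--             return name
--         if fallback is None and query_lower in name.lower():
--             fallback = name
--     return fallback
-- ===== Notes on version B (the rewrite author's own statement) =====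
-- stated objective: simpler
-- what changed: Replaces A's two separate passes (exact-match scan, then substring scan) with one pass that returns immediately on an exact match while remembering the first substring match as a fallback.
import Mathlib
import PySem

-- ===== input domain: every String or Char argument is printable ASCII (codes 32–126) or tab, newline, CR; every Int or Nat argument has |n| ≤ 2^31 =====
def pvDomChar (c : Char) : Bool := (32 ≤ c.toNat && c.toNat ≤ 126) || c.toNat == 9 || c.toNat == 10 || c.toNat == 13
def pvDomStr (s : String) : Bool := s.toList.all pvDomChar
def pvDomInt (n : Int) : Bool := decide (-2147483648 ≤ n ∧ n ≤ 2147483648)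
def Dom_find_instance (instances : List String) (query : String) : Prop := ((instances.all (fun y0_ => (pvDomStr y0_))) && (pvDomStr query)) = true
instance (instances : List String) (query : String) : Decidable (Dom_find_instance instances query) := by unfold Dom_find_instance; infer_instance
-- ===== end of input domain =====

-- B is a single pass: it returns at once on an exact (case-insensitive) match and remembers the
-- first substring match as a fallback, instead of A's two separate scans over the list.

-- ===== PORT A =====
-- A: first loop returns the first exact lowercase match; second loop the first substring match; else None.
def find_instance (instances : List String) (query : String) : Option String :=
  let query_lower := PySem.Str.lower (PySem.Str.strip query)
  match instances.find? (fun name => PySem.Str.lower name == query_lower) with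
  | some name => some name
  | none => instances.find? (fun name => PySem.Str.isIn query_lower (PySem.Str.lower name))

-- ===== PORT B =====
-- B's loop with early return and a fallback accumulator, as structural recursion.
def find_instance_altLoop (query_lower : String) (fallback : Option String) :
    List String → Option String
  | [] => fallback
  | name :: rest =>
    if PySem.Str.lower name == query_lower then some name
    else if fallback.isNone && PySem.Str.isIn query_lower (PySem.Str.lower name) then
      find_instance_altLoop query_lower (some name) rest
    else
      find_instance_altLoop query_lower fallback rest

def find_instance_alt (instances : List String) (query : String) : Option String :=
  find_instance_altLoop (PySem.Str.lower (PySem.Str.strip query)) none instances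

-- ===== PRECONDITION & SPEC =====
def Spec_find_instance (instances : List String) (query : String) (out : Option String) : Prop := out = find_instance_alt instances query
instance (instances : List String) (query : String) (out : Option String) : Decidable (Spec_find_instance instances query out) := by unfold Spec_find_instance; infer_instance

-- ===== CLAIM (what is proved, stated in full; the proofs are below) =====
def Claim_equal_find_instance : Prop := ∀ (instances : List String) (query : String), Dom_find_instance instances query → Spec_find_instance instances query (find_instance instances query)

-- ===== LEMMAS AND PROOFS =====

-- Loop invariant: B's single pass computes "first exact match, else fallback-or-first-substring-match".
theorem find_instance_altLoop_eq (ql : String) (fb : Option String) (l : List String) :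
    find_instance_altLoop ql fb l =
      match l.find? (fun name => PySem.Str.lower name == ql) with
      | some name => some name
      | none => fb.or (l.find? (fun name => PySem.Str.isIn ql (PySem.Str.lower name))) := by
  induction l generalizing fb with
  | nil => simp [find_instance_altLoop]
  | cons name rest ih =>
    simp only [find_instance_altLoop, List.find?]
    by_cases hx : PySem.Str.lower name == ql
    · simp [hx]
    · simp only [hx, Bool.false_eq_true, if_false]
      by_cases hs : PySem.Str.isIn ql (PySem.Str.lower name)
      · cases fb with
        | none =>
          simp only [Option.isNone_none, hs, Bool.and_self, if_true, ih]
          cases rest.find? (fun n => PySem.Str.lower n == ql) <;> simp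
        | some f =>
          simp only [Option.isNone_some, Bool.false_and, ih]
          cases rest.find? (fun n => PySem.Str.lower n == ql) <;> simp
      · simp only [hs, Bool.and_false, ih]
        cases rest.find? (fun n => PySem.Str.lower n == ql) <;> simp

-- ===== VERDICT (by name: the statement is the Claim_ definition above) =====
theorem find_instance_spec : Claim_equal_find_instance := by
  intro instances query _
  unfold Spec_find_instance find_instance find_instance_alt
  rw [find_instance_altLoop_eq]
  cases h : instances.find? (fun name =>
      PySem.Str.lower name == PySem.Str.lower (PySem.Str.strip query)) <;> simp only [h, Option.none_or]
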